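-- pv_equiv track=rewrite | github.com/nchristie/robogo | games/game_logic.py | get_row_score
-- ===== SOURCE A (Python) =====
-- def get_row_score(row, stone_colour):
--     row_score = [0 for x in row]
--     score_count = 0
--     for cell in row:
--         if cell == stone_colour:
--             row_score[score_count] += 1
--         else:
--             score_count += 1
--     return max(row_score)
-- ===== SOURCE B (Python) =====
-- def get_row_score(row, stone_colour):
--     run_lengths = []
--     i = 0
--     n = len(row)
--     while i < n:
--         j = i
--         while j < n and row[j] == row[i]:
--             j += 1
--         run_lengths.append(j - i if row[i] == stone_colour else 0)
--         i = j
--     return max(run_lengths)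
-- ===== Notes on version B (the rewrite author's own statement) =====
-- stated objective: idiomatic
-- what changed: B partitions the row into maximal equal runs and takes max of the run lengths (non-matching runs contribute 0), instead of A's indexed accumulator list updated in place during a single pass.
import Mathlib
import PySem

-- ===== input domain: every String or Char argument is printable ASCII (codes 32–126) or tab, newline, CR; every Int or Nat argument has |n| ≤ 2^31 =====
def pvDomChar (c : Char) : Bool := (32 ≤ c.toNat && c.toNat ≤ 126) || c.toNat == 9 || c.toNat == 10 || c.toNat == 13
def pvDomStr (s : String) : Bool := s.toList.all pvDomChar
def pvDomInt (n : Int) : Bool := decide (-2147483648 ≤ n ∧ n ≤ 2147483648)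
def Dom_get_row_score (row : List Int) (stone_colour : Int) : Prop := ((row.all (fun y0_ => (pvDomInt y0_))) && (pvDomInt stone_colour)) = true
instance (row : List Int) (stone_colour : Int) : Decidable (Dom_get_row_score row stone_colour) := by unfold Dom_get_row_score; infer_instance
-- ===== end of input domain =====

-- B partitions the row into maximal equal runs and maxes the run lengths (0 for non-matching runs),
-- instead of A's in-place indexed accumulator list; objective: idiomatic, same O(n) cost.

-- ===== PORT A =====
-- A's for-loop over the row, carrying the row_score list and score_count.
def loopA (colour : Int) : List Int → List Int → Nat → List Int
  | [], scores, _ => scores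
  | c :: rest, scores, k =>
      if c == colour then loopA colour rest (scores.modify k (· + 1)) k
      else loopA colour rest scores (k + 1)

def get_row_score (row : List Int) (stone_colour : Int) : Int :=
  -- max(row_score); Python raises ValueError on an empty list, excluded by Pre_ (getD 0 is only totalisation)
  (PySem.List.max? (loopA stone_colour row (row.map (fun _ => (0 : Int))) 0) (fun y => y)).getD 0

-- ===== PORT B =====
-- B's outer while-loop: peel one maximal run of equal cells per step (inner while = takeWhile/dropWhile).
def runLengthsB (colour : Int) : List Int → List Int
  | [] => []
  | c :: rest =>
      (if c == colour then (1 + (rest.takeWhile (· == c)).length : Int) else 0)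
        :: runLengthsB colour (rest.dropWhile (· == c))
  termination_by cells => cells.length
  decreasing_by
    simp only [List.length_cons]
    exact Nat.lt_succ_of_le (List.length_dropWhile_le _ _)

def get_row_score_alt (row : List Int) (stone_colour : Int) : Int :=
  -- max(run_lengths); Python raises ValueError on an empty list, excluded by Pre_
  (PySem.List.max? (runLengthsB stone_colour row) (fun y => y)).getD 0

-- ===== PRECONDITION & SPEC =====
-- Both A and B raise ValueError (max of an empty sequence) on the empty row; Pre_ excludes exactly that.
def Pre_get_row_score (row : List Int) (_stone_colour : Int) : Prop := row ≠ []
instance (row : List Int) (stone_colour : Int) : Decidable (Pre_get_row_score row stone_colour) := by unfold Pre_get_row_score; infer_instance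
def pvWitness_get_row_score : List Int × Int := ([1, 1, 0, 1], 1)

def Spec_get_row_score (row : List Int) (stone_colour : Int) (out : Int) : Prop := out = get_row_score_alt row stone_colour
instance (row : List Int) (stone_colour : Int) (out : Int) : Decidable (Spec_get_row_score row stone_colour out) := by unfold Spec_get_row_score; infer_instance

-- ===== CLAIM (what is proved, stated in full; the proofs are below) =====
def Claim_equal_get_row_score : Prop := ∀ (row : List Int) (stone_colour : Int), Dom_get_row_score row stone_colour → Pre_get_row_score row stone_colour → Spec_get_row_score row stone_colour (get_row_score row stone_colour)

-- ===== LEMMAS AND PROOFS =====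

-- max of a nonempty list, the way Python's max computes it
def maxL : List Int → Int
  | [] => 0
  | x :: t => t.foldl max x

lemma maxL_max? (x : Int) (t : List Int) :
    (PySem.List.max? (x :: t) (fun y => y)).getD 0 = maxL (x :: t) := by
  rw [PySem.List.max?_id_cons]; rfl

lemma foldl_max_shift (t : List Int) : ∀ a b : Int, t.foldl max (max a b) = max a (t.foldl max b) := by
  induction t with
  | nil => intro a b; rfl
  | cons y t ih =>
      intro a b
      simp only [List.foldl_cons]
      rw [max_assoc, ih]

lemma maxL_cons (x y : Int) (t : List Int) : maxL (x :: y :: t) = max x (maxL (y :: t)) := by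
  simp only [maxL, List.foldl_cons]
  exact foldl_max_shift t x y

lemma le_maxL {x : Int} {L : List Int} (h : x ∈ L) : x ≤ maxL L := by
  induction L with
  | nil => cases h
  | cons a t ih =>
      cases t with
      | nil => simp at h; simp [maxL, h]
      | cons b t' =>
          rw [maxL_cons]
          rcases List.mem_cons.mp h with rfl | h'
          · exact le_max_left _ _
          · exact le_trans (ih h') (le_max_right _ _)

lemma maxL_cons_ne (x : Int) (L : List Int) (h : L ≠ []) : maxL (x :: L) = max x (maxL L) := by
  cases L with
  | nil => exact absurd rfl h
  | cons y t => exact maxL_cons x y t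

-- the "max over the runs", tail-carried: gRun colour cells cur = best score given a current run of cur
def gRun (colour : Int) : List Int → Int → Int
  | [], cur => cur
  | c :: rest, cur => if c = colour then gRun colour rest (cur + 1) else max cur (gRun colour rest 0)

lemma gRun_ge (colour : Int) : ∀ (cells : List Int) (cur : Int), cur ≤ gRun colour cells cur := by
  intro cells
  induction cells with
  | nil => intro cur; simp [gRun]
  | cons c rest ih =>
      intro cur
      simp only [gRun]
      split
      · exact le_trans (by omega) (ih (cur + 1))
      · exact le_max_left _ _

lemma maxL_modify (k : Nat) (L : List Int) (h : k < L.length) :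
    maxL (L.modify k (· + 1)) = max (maxL L) (L.getD k 0 + 1) := by
  induction L generalizing k with
  | nil => simp at h
  | cons x t ih =>
      cases k with
      | zero =>
          cases t with
          | nil => simp [maxL]
          | cons y t' =>
              simp only [List.modify_zero_cons, List.getD_cons_zero]
              rw [maxL_cons, maxL_cons, max_comm (max x (maxL (y :: t'))) (x + 1),
                  ← max_assoc, max_eq_left (by omega : x ≤ x + 1)]
      | succ k' =>
          have hk : k' < t.length := by simpa using h
          cases t with
          | nil => simp at hk
          | cons y t' =>
              simp only [List.modify_succ_cons, List.getD_cons_succ]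
              have hmod : ∃ z zs, (y :: t').modify k' (· + 1) = z :: zs := by
                cases hc : (y :: t').modify k' (· + 1) with
                | nil => have := congrArg List.length hc; simp at this
                | cons z zs => exact ⟨z, zs, rfl⟩
              obtain ⟨z, zs, hz⟩ := hmod
              rw [hz, maxL_cons, ← hz, ih k' hk, maxL_cons, max_assoc]

lemma getD_le_maxL (L : List Int) (k : Nat) (hne : L ≠ []) (hnn : ∀ x ∈ L, 0 ≤ x) :
    L.getD k 0 ≤ maxL L := by
  by_cases hk : k < L.length
  · rw [List.getD_eq_getElem L 0 hk]; exact le_maxL (L.getElem_mem hk)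
  · rw [List.getD_eq_default L 0 (by omega)]
    cases L with
    | nil => exact absurd rfl hne
    | cons x t => exact le_trans (hnn x (List.mem_cons_self)) (le_maxL List.mem_cons_self)

lemma getD_modify_self (L : List Int) (k : Nat) (h : k < L.length) :
    (L.modify k (· + 1)).getD k 0 = L.getD k 0 + 1 := by
  simp [List.getD, List.getElem?_eq_getElem h]

lemma getD_modify_ne (L : List Int) (k i : Nat) (hne : i ≠ k) :
    (L.modify k (· + 1)).getD i 0 = L.getD i 0 := by
  simp [List.getD, Ne.symm hne]

lemma nonneg_modify (L : List Int) (k : Nat) (hnn : ∀ x ∈ L, 0 ≤ x) :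
    ∀ x ∈ L.modify k (· + 1), 0 ≤ x := by
  induction L generalizing k with
  | nil => simp
  | cons a t ih =>
    cases k with
    | zero =>
        simp only [List.modify_zero_cons]
        intro x hx
        rcases List.mem_cons.mp hx with rfl | h
        · have := hnn a List.mem_cons_self; omega
        · exact hnn x (List.mem_cons_of_mem _ h)
    | succ k' =>
        simp only [List.modify_succ_cons]
        intro x hx
        rcases List.mem_cons.mp hx with rfl | h
        · exact hnn x List.mem_cons_self
        · exact ih k' (fun y hy => hnn y (List.mem_cons_of_mem _ hy)) x h

lemma replicate_getD (n i : Nat) : (List.replicate n (0 : Int)).getD i 0 = 0 := by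
  simp [List.getD, List.getElem?_replicate]; split <;> rfl

-- main invariant for A's loop
lemma loopA_main (colour : Int) :
    ∀ (cells scores : List Int) (k : Nat), scores ≠ [] →
      k + cells.length ≤ scores.length →
      (∀ i, k < i → scores.getD i 0 = 0) →
      (∀ x ∈ scores, 0 ≤ x) →
      maxL (loopA colour cells scores k) = max (maxL scores) (gRun colour cells (scores.getD k 0)) := by
  intro cells
  induction cells with
  | nil =>
      intro scores k hne _ _ hnn
      simp only [loopA, gRun]
      exact (max_eq_left (getD_le_maxL scores k hne hnn)).symm
  | cons c rest ih =>
      intro scores k hne hlen hz hnn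
      have hk : k < scores.length := by simp at hlen; omega
      simp only [loopA, gRun, beq_iff_eq]
      split
      · -- c = colour
        next hc =>
        subst hc
        set scores' := scores.modify k (· + 1) with hs'
        have hne' : scores' ≠ [] := by
          intro h0; apply hne
          have := congrArg List.length h0; simp [hs'] at this; simpa using this
        have hlen' : k + rest.length ≤ scores'.length := by
          simp only [hs', List.length_modify]; simp at hlen; omega
        have hz' : ∀ i, k < i → scores'.getD i 0 = 0 := by
          intro i hi; rw [hs', getD_modify_ne _ _ _ (by omega)]; exact hz i hi
        have hnn' : ∀ x ∈ scores', 0 ≤ x := nonneg_modify scores k hnn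
        rw [ih scores' k hne' hlen' hz' hnn']
        rw [hs', getD_modify_self scores k hk, maxL_modify k scores hk]
        have h1 : scores.getD k 0 + 1 ≤ gRun c rest (scores.getD k 0 + 1) := gRun_ge c rest _
        rw [max_assoc, max_eq_right h1]
      · -- c ≠ colour
        have hlen' : (k + 1) + rest.length ≤ scores.length := by simp at hlen; omega
        have hz' : ∀ i, k + 1 < i → scores.getD i 0 = 0 := fun i hi => hz i (by omega)
        rw [ih scores (k + 1) hne hlen' hz' hnn, hz (k + 1) (by omega)]
        have h2 : scores.getD k 0 ≤ maxL scores := getD_le_maxL scores k hne hnn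
        rw [← max_assoc, max_eq_left h2]

lemma maxL_zeros : ∀ n : Nat, maxL (List.replicate (n + 1) (0 : Int)) = 0 := by
  intro n
  induction n with
  | zero => rfl
  | succ m ih =>
      rw [List.replicate_succ, List.replicate_succ, maxL_cons, ← List.replicate_succ, ih]
      simp

-- A computes max 0 (gRun row 0) on a nonempty row
lemma A_char (row : List Int) (colour : Int) (hne : row ≠ []) :
    get_row_score row colour = max 0 (gRun colour row 0) := by
  cases row with
  | nil => exact absurd rfl hne
  | cons r rs =>
      unfold get_row_score
      have hzeros : (r :: rs).map (fun _ => (0 : Int)) = List.replicate (rs.length + 1) 0 := by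
        simp [List.map_const', List.replicate_succ]
      rw [hzeros]
      have hne0 : List.replicate (rs.length + 1) (0 : Int) ≠ [] := by simp
      have hloop : ∃ z zs, loopA colour (r :: rs) (List.replicate (rs.length + 1) 0) 0 = z :: zs := by
        cases hc : loopA colour (r :: rs) (List.replicate (rs.length + 1) 0) 0 with
        | nil =>
            exfalso
            have hlen : ∀ cells scores k, (loopA colour cells scores k).length = scores.length := by
              intro cells
              induction cells with
              | nil => intro scores k; rfl
              | cons c rest ih =>
                  intro scores k
                  simp only [loopA]
                  split
                  · rw [ih]; simp [List.length_modify]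
                  · rw [ih]
            have := congrArg List.length hc
            rw [hlen] at this
            simp at this
        | cons z zs => exact ⟨z, zs, rfl⟩
      obtain ⟨z, zs, hz⟩ := hloop
      rw [hz, maxL_max?, ← hz]
      rw [loopA_main colour (r :: rs) _ 0 hne0 (by simp)
            (fun i _ => replicate_getD _ i) (fun x hx => by simp at hx; omega)]
      rw [maxL_zeros rs.length, replicate_getD _ 0]

-- gRun over a run of colour cells
lemma gRun_run_colour (colour : Int) :
    ∀ (run : List Int), (∀ x ∈ run, x = colour) → ∀ rest cur,
      gRun colour (run ++ rest) cur = gRun colour rest (cur + run.length) := by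
  intro run
  induction run with
  | nil => intro _ rest cur; simp
  | cons e run' ih =>
      intro hall rest cur
      have he : e = colour := hall e List.mem_cons_self
      simp only [List.cons_append, gRun, he]
      rw [ih (fun x hx => hall x (List.mem_cons_of_mem _ hx)) rest (cur + 1)]
      congr 1
      simp only [List.length_cons]
      push_cast
      ring

-- gRun over non-colour cells
lemma gRun_run_other (colour : Int) :
    ∀ (run : List Int), (∀ x ∈ run, x ≠ colour) → ∀ rest,
      gRun colour (run ++ rest) 0 = max 0 (gRun colour rest 0) := by
  intro run
  induction run with
  | nil =>
      intro _ rest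
      simp only [List.nil_append]
      exact (max_eq_right (le_trans (le_refl 0) (gRun_ge colour rest 0))).symm
  | cons e run' ih =>
      intro hall rest
      have he : e ≠ colour := hall e List.mem_cons_self
      simp only [List.cons_append, gRun, if_neg he]
      rw [ih (fun x hx => hall x (List.mem_cons_of_mem _ hx)) rest]
      rw [← max_assoc, max_self]

lemma B_char_aux (colour : Int) :
    ∀ (n : Nat) (cells : List Int), cells.length = n → cells ≠ [] →
      maxL (runLengthsB colour cells) = max 0 (gRun colour cells 0) := by
  intro n
  induction n using Nat.strong_induction_on with
  | _ n ih =>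
  intro cells hn hne
  cases cells with
  | nil => exact absurd rfl hne
  | cons c rest =>
    have hsplit : rest.takeWhile (· == c) ++ rest.dropWhile (· == c) = rest :=
      List.takeWhile_append_dropWhile
    have hrunall : ∀ x ∈ rest.takeWhile (· == c), x = c := fun x hx => by
      simpa using List.mem_takeWhile_imp hx
    have hlt : (rest.dropWhile (· == c)).length < n := by
      rw [← hn]
      exact Nat.lt_succ_of_le (List.length_dropWhile_le _ _)
    rw [runLengthsB]
    by_cases hc : c = colour
    · subst hc
      simp only [beq_self_eq_true, if_true]
      have hg : gRun c (c :: rest) 0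
          = gRun c (rest.dropWhile (· == c)) (1 + (rest.takeWhile (· == c)).length) := by
        conv_lhs => rw [← hsplit]
        rw [show (c :: (rest.takeWhile (· == c) ++ rest.dropWhile (· == c)))
              = (c :: rest.takeWhile (· == c)) ++ rest.dropWhile (· == c) by simp]
        rw [gRun_run_colour c (c :: rest.takeWhile (· == c)) (fun x hx => by
              rcases List.mem_cons.mp hx with rfl | h
              · rfl
              · exact hrunall x h) _ 0]
        congr 1
        simp only [List.length_cons]
        push_cast
        ring
      cases hre : rest.dropWhile (· == c) with
      | nil =>
          rw [hg, hre]
          simp only [runLengthsB, gRun]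
          show (1 + ((rest.takeWhile (· == c)).length : Int)) = max 0 _
          rw [max_eq_right (by positivity)]
      | cons d more =>
          have hd : d ≠ c := by
            have h1 := List.head?_dropWhile_not (· == c) rest
            rw [hre] at h1
            simpa using h1
          rw [hg, hre]
          have hihres : maxL (runLengthsB c (d :: more)) = max 0 (gRun c (d :: more) 0) :=
            ih (d :: more).length (hre ▸ hlt) (d :: more) rfl (by simp)
          rw [maxL_cons_ne _ _ (by rw [runLengthsB]; simp), hihres]
          simp only [gRun, if_neg hd]
          have hg0 : (0 : Int) ≤ gRun c more 0 := gRun_ge c more 0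
          have hL0 : (0 : Int) ≤ 1 + (rest.takeWhile (· == c)).length := by positivity
          rw [max_eq_right hg0, max_eq_right (le_trans hL0 (le_max_left _ _)),
              max_eq_right hg0]
    · have hcb : (c == colour) = false := by simpa using hc
      simp only [hcb, Bool.false_eq_true, if_false]
      have hrunall' : ∀ x ∈ rest.takeWhile (· == c), x ≠ colour := fun x hx => by
        rw [hrunall x hx]; exact hc
      have hg : gRun colour (c :: rest) 0 = max 0 (gRun colour (rest.dropWhile (· == c)) 0) := by
        conv_lhs => rw [← hsplit]
        rw [show (c :: (rest.takeWhile (· == c) ++ rest.dropWhile (· == c)))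
              = (c :: rest.takeWhile (· == c)) ++ rest.dropWhile (· == c) by simp]
        exact gRun_run_other colour (c :: rest.takeWhile (· == c)) (fun x hx => by
              rcases List.mem_cons.mp hx with rfl | h
              · exact hc
              · exact hrunall' x h) _
      cases hre : rest.dropWhile (· == c) with
      | nil =>
          rw [hg, hre]
          simp [runLengthsB, gRun, maxL]
      | cons d more =>
          rw [hg, hre]
          have hihres : maxL (runLengthsB colour (d :: more)) = max 0 (gRun colour (d :: more) 0) :=
            ih (d :: more).length (hre ▸ hlt) (d :: more) rfl (by simp)
          rw [maxL_cons_ne _ _ (by rw [runLengthsB]; simp), hihres, ← max_assoc, max_self]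

lemma B_char (colour : Int) (cells : List Int) (hne : cells ≠ []) :
    maxL (runLengthsB colour cells) = max 0 (gRun colour cells 0) :=
  B_char_aux colour cells.length cells rfl hne

-- ===== VERDICT (by name: the statement is the Claim_ definition above) =====
theorem get_row_score_spec : Claim_equal_get_row_score := by
  intro row stone_colour _ hpre
  unfold Spec_get_row_score
  rw [A_char row stone_colour hpre]
  unfold get_row_score_alt
  cases hLB : runLengthsB stone_colour row with
  | nil =>
      exfalso
      cases row with
      | nil => exact hpre rfl
      | cons c rest => rw [runLengthsB] at hLB; simp at hLB
  | cons z zs =>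
      rw [maxL_max? z zs, ← hLB, B_char stone_colour row hpre]
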